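-- pv_equiv track=rewrite | github.com/qemqemqem/ai-art-generator | backend/pipeline/expressions.py | _preprocess_expression
-- ===== SOURCE A (Python) =====
-- def _preprocess_expression(expression: str) -> str:
--     """
--     Preprocess an expression to handle dot notation.
--
--     Converts "asset.name" to "asset_name" for simpleeval compatibility,
--     but preserves string literals and method calls.
--     """
--     import re
--
--     result = []
--     i = 0
--     in_string = False
--     string_char = None
--
--     while i < len(expression):
--         char = expression[i]
--
--         # Track string state
--         if char in ('"', "'") and (i == 0 or expression[i-1] != '\\'):
--             if not in_string:
--                 in_string = True
--                 string_char = char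
--             elif char == string_char:
--                 in_string = False
--                 string_char = None
--             result.append(char)
--             i += 1
--             continue
--
--         # If in string, pass through unchanged
--         if in_string:
--             result.append(char)
--             i += 1
--             continue
--
--         # Convert dot notation outside strings
--         if char == '.':
--             # Check if this is a method call (followed by identifier then '(')
--             # or a number (preceded by digit)
--             if i > 0 and expression[i-1].isdigit():
--                 # Part of a number like 0.5
--                 result.append(char)
--             else:
--                 # Convert to underscore for attribute access
--                 result.append('_')
--             i += 1
--             continue
--
--         result.append(char)
--         i += 1
--
--     return ''.join(result)
-- ===== SOURCE B (Python) =====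
-- def _preprocess_expression(expression: str) -> str:
--     # Segment-based rewrite: copy whole string literals verbatim with an inner
--     # scan that jumps to the closing quote; replace dots only between literals.
--     out = []
--     i, n = 0, len(expression)
--     while i < n:
--         ch = expression[i]
--         if ch in '"\'' and (i == 0 or expression[i - 1] != '\\'):
--             # scan ahead to the matching unescaped closing quote (or end of string)
--             j = i + 1
--             while j < n and not (expression[j] == ch and expression[j - 1] != '\\'):
--                 j += 1
--             end = min(j + 1, n)
--             out.append(expression[i:end])
--             i = end
--         elif ch == '.':
--             out.append(ch if i > 0 and expression[i - 1].isdigit() else '_')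
--             i += 1
--         else:
--             out.append(ch)
--             i += 1
--     return ''.join(out)
-- ===== Notes on version B (the rewrite author's own statement) =====
-- stated objective: alternative
-- what changed: Replaces A's single character-at-a-time state machine (in_string/string_char flags threaded through every step) by a stateless segment-based rewriter: on an opening quote an inner scan jumps directly to the matching unescaped closing quote and copies the whole literal verbatim as one slice, so dot substitution only ever runs between literals and no string-state flags exist.
import Mathlib
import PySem

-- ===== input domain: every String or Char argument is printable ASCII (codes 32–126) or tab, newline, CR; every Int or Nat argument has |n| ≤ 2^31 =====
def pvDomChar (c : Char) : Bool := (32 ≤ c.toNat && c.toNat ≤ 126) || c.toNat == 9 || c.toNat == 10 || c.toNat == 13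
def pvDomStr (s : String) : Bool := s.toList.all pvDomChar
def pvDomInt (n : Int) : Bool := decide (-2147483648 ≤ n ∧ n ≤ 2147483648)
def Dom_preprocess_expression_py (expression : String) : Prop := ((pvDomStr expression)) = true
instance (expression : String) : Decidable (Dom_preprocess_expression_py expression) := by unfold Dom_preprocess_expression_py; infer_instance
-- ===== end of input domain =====

-- B replaces A's in_string/string_char state machine by a segment rewriter that copies each
-- string literal verbatim via an inner scan to its closing quote (objective: alternative; same cost).

-- shared helper: 'i > 0 and expression[i-1].isdigit()' with the previous char carried along
def pvPrevDigit : Option Char → Bool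
  | some p => PySem.Chars.isdigit p
  | none => false

-- ===== PORT A =====
-- A's while-loop: one recursion over the remaining chars; 'prev' is expression[i-1]
-- (none at i = 0), 'inStr'/'sc' are in_string/string_char.
def pvALoop : List Char → Option Char → Bool → Option Char → List Char
  | [], _, _, _ => []
  | c :: rest, prev, inStr, sc =>
    if (c == '"' || c == '\'') && !(prev == some '\\') then
      if !inStr then c :: pvALoop rest (some c) true (some c)
      else if some c == sc then c :: pvALoop rest (some c) false none
      else c :: pvALoop rest (some c) inStr sc
    else if inStr then c :: pvALoop rest (some c) inStr sc
    else if c == '.' then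
      if pvPrevDigit prev then c :: pvALoop rest (some c) inStr sc
      else '_' :: pvALoop rest (some c) inStr sc
    else c :: pvALoop rest (some c) inStr sc

def preprocess_expression_py (expression : String) : String :=
  String.ofList (pvALoop expression.toList none false none)

-- ===== PORT B =====
-- Source B's inner scan: consume chars up to and including the unescaped closing quote q
-- (or everything if the literal is unterminated); 'prev' is the previously consumed char.
-- Returns (consumed segment, remainder).
def pvScanLit (q : Char) : List Char → Char → List Char × List Char
  | [], _ => ([], [])
  | c :: rest, prev =>
    if c == q && !(prev == '\\') then ([c], rest)
    else
      let s := pvScanLit q rest c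
      (c :: s.1, s.2)

lemma pvScanLit_len (q : Char) : ∀ (l : List Char) (p : Char), (pvScanLit q l p).2.length ≤ l.length := by
  intro l
  induction l with
  | nil => intro p; simp [pvScanLit]
  | cons c rest ih =>
    intro p
    simp only [pvScanLit]
    split
    · simp
    · exact Nat.le_succ_of_le (ih c)

-- Source B's outer while-loop: dispatch per segment; on an opening quote copy the whole
-- literal found by pvScanLit, otherwise rewrite a single character.
def pvBLoop : List Char → Option Char → List Char
  | [], _ => []
  | c :: rest, prev =>
    if (c == '"' || c == '\'') && !(prev == some '\\') then
      let s := pvScanLit c rest c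
      (c :: s.1) ++ pvBLoop s.2 (some (s.1.getLastD c))
    else if c == '.' then
      (if pvPrevDigit prev then c else '_') :: pvBLoop rest (some c)
    else
      c :: pvBLoop rest (some c)
termination_by l _ => l.length
decreasing_by
  · exact Nat.lt_succ_of_le (pvScanLit_len _ _ _)
  all_goals simp

def preprocess_expression_py_alt (expression : String) : String :=
  String.ofList (pvBLoop expression.toList none)

-- ===== PRECONDITION & SPEC =====
def Spec_preprocess_expression_py (expression : String) (out : String) : Prop := out = preprocess_expression_py_alt expression
instance (expression : String) (out : String) : Decidable (Spec_preprocess_expression_py expression out) := by unfold Spec_preprocess_expression_py; infer_instance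

-- ===== CLAIM (what is proved, stated in full; the proofs are below) =====
def Claim_equal_preprocess_expression_py : Prop := ∀ (expression : String), Dom_preprocess_expression_py expression → Spec_preprocess_expression_py expression (preprocess_expression_py expression)

-- ===== LEMMAS AND PROOFS =====

-- Inside a literal opened with quote q, A's loop emits exactly the segment pvScanLit finds
-- and then continues out of string state at the remainder, with the last consumed char as prev.
lemma pvALoop_in_lit (q : Char) (hq : q = '"' ∨ q = '\'') :
    ∀ (l : List Char) (p : Char),
      pvALoop l (some p) true (some q) =
        (pvScanLit q l p).1 ++
          pvALoop (pvScanLit q l p).2 (some ((pvScanLit q l p).1.getLastD p)) false none := by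
  intro l
  induction l with
  | nil => intro p; simp [pvScanLit, pvALoop]
  | cons c rest ih =>
    intro p
    by_cases hcq : c = q ∧ p ≠ '\\'
    · -- closing quote
      obtain ⟨h1, h2⟩ := hcq
      subst h1
      have hsc : pvScanLit c (c :: rest) p = ([c], rest) := by
        simp [pvScanLit, h2]
      have hquote : ((c == '"' || c == '\'') && !(some p == some '\\')) = true := by
        rcases hq with h | h <;> subst h <;> simp_all
      have hA : pvALoop (c :: rest) (some p) true (some c) = c :: pvALoop rest (some c) false none := by
        rw [pvALoop, if_pos hquote]
        simp
      rw [hA, hsc]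
      simp [List.getLastD]
    · -- pass-through inside the string
      have hscan : pvScanLit q (c :: rest) p = ((c :: (pvScanLit q rest c).1), (pvScanLit q rest c).2) := by
        simp only [pvScanLit]
        split
        · rename_i h
          exfalso; apply hcq
          simp only [Bool.and_eq_true, beq_iff_eq, Bool.not_eq_eq_eq_not, Bool.not_true,
            beq_eq_false_iff_ne, ne_eq] at h
          exact h
        · rfl
      have hA : pvALoop (c :: rest) (some p) true (some q) = c :: pvALoop rest (some c) true (some q) := by
        simp only [pvALoop]
        split
        · rename_i h
          have hne : ¬ c = q := by
            intro hcq'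
            subst hcq'
            simp only [Bool.and_eq_true, Bool.not_eq_eq_eq_not, Bool.not_true,
              beq_eq_false_iff_ne, ne_eq, Option.some.injEq] at h
            exact hcq ⟨rfl, h.2⟩
          simp [hne]
        · simp
      rw [hA, ih c, hscan]
      rcases (pvScanLit q rest c).1 with _ | ⟨d, ds⟩
      · rfl
      · simp [List.getLastD]

lemma pvLoop_eq : ∀ (n : ℕ) (l : List Char), l.length ≤ n → ∀ (prev : Option Char),
    pvALoop l prev false none = pvBLoop l prev := by
  intro n
  induction n with
  | zero =>
    intro l hl prev
    have : l = [] := List.eq_nil_of_length_eq_zero (Nat.le_zero.mp hl)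
    subst this; simp [pvALoop, pvBLoop]
  | succ n ih =>
    intro l hl prev
    rcases l with _ | ⟨c, rest⟩
    · simp [pvALoop, pvBLoop]
    · by_cases hquote : ((c == '"' || c == '\'') && !(prev == some '\\')) = true
      · have hq : c = '"' ∨ c = '\'' := by
          simp only [Bool.and_eq_true, Bool.or_eq_true, beq_iff_eq] at hquote
          exact hquote.1
        have hA : pvALoop (c :: rest) prev false none = c :: pvALoop rest (some c) true (some c) := by
          simp [pvALoop, hquote]
        have hB : pvBLoop (c :: rest) prev =
            (c :: (pvScanLit c rest c).1) ++
              pvBLoop (pvScanLit c rest c).2 (some ((pvScanLit c rest c).1.getLastD c)) := by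
          rw [pvBLoop]; simp [hquote]
        rw [hA, hB, pvALoop_in_lit c hq rest c]
        have hlen : (pvScanLit c rest c).2.length ≤ n := by
          have := pvScanLit_len c rest c
          simp only [List.length_cons] at hl
          omega
        rw [ih _ hlen]
        simp
      · have hA : pvALoop (c :: rest) prev false none =
            (if c == '.' then (if pvPrevDigit prev then c else '_') else c) :: pvALoop rest (some c) false none := by
          simp only [pvALoop, hquote]
          split_ifs <;> simp_all
        have hB : pvBLoop (c :: rest) prev =
            (if c == '.' then (if pvPrevDigit prev then c else '_') else c) :: pvBLoop rest (some c) := by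
          rw [pvBLoop]
          simp only [hquote]
          split_ifs <;> simp_all
        rw [hA, hB, ih rest (by simp at hl; omega)]

-- ===== VERDICT (by name: the statement is the Claim_ definition above) =====
theorem preprocess_expression_py_spec : Claim_equal_preprocess_expression_py := by
  intro e _
  unfold Spec_preprocess_expression_py preprocess_expression_py preprocess_expression_py_alt
  rw [pvLoop_eq e.toList.length e.toList le_rfl]
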